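-- pv_equiv track=rewrite | github.com/Asad-Ismail/lore | src/lore/demo.py | _detect_connections
-- ===== SOURCE A (Python) =====
-- ARTICLE_CONNECTIONS = [
--     ("mcp", "Model Context Protocol"),
--     ("model context protocol", "Model Context Protocol"),
--     ("wiki", "LLM Wiki"),
--     ("markdown", "LLM Wiki"),
--     ("memory", "Active Memory"),
--     ("context", "Active Memory"),
--     ("trace", "Curiosity Training"),
--     ("question", "Curiosity Training"),
--     ("suggest", "Curiosity Training"),
-- ]
--
-- def _detect_connections(content: str) -> list[str]:
--     haystack = content.lower()
--     connections = []
--     for needle, title in ARTICLE_CONNECTIONS: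
--         if needle in haystack and title not in connections:
--             connections.append(title)
--     if not connections:
--         connections.append("Demo Tour")
--     return connections[:4]
-- ===== SOURCE B (Python) =====
-- _TITLE_GROUPS = [
--     ("Model Context Protocol", ("mcp", "model context protocol")),
--     ("LLM Wiki", ("wiki", "markdown")),
--     ("Active Memory", ("memory", "context")),
--     ("Curiosity Training", ("trace", "question", "suggest")),
-- ]
--
-- # Precomputed answer table: one entry per 4-bit match mask.
-- _RESULTS = []
-- for _mask in range(16):
--     _titles = [t for _i, (t, _kws) in enumerate(_TITLE_GROUPS) if _mask >> _i & 1]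
--     _RESULTS.append(_titles if _titles else ["Demo Tour"])
--
-- def _detect_connections(content: str) -> list[str]:
--     haystack = content.lower()
--     mask = sum(1 << i for i, (_t, kws) in enumerate(_TITLE_GROUPS)
--                if any(k in haystack for k in kws))
--     return list(_RESULTS[mask])
-- ===== Notes on version B (the rewrite author's own statement) =====
-- stated objective: alternative
-- what changed: Replaces A's ordered scan-with-dedup of the flat keyword list by reducing the input to a 4-bit match mask (one bit per title group) and returning a precomputed 16-entry answer table's row, with the fallback baked into the table.
import Mathlib
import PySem

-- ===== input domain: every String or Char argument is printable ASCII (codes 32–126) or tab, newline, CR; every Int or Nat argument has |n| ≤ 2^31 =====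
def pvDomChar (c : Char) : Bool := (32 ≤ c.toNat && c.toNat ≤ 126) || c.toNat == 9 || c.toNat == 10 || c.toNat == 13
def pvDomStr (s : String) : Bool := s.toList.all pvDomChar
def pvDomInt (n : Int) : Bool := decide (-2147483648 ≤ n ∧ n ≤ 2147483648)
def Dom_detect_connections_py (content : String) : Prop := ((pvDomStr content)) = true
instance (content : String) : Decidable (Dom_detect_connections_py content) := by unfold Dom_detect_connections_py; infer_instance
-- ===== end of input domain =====

-- B reduces the input to a 4-bit match mask (one bit per title group) and looks the
-- answer up in a precomputed 16-entry table (fallback baked in); objective: alternative.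

-- ===== PORT A =====
def pvArticleConnections : List (String × String) :=
  [("mcp", "Model Context Protocol"),
   ("model context protocol", "Model Context Protocol"),
   ("wiki", "LLM Wiki"),
   ("markdown", "LLM Wiki"),
   ("memory", "Active Memory"),
   ("context", "Active Memory"),
   ("trace", "Curiosity Training"),
   ("question", "Curiosity Training"),
   ("suggest", "Curiosity Training")]

def detect_connections_py (content : String) : List String :=
  let haystack := PySem.Str.lower content
  let connections : List String :=
    pvArticleConnections.foldl
      (fun connections nt =>
        if PySem.Str.isIn nt.1 haystack && !(connections.contains nt.2) then
          connections ++ [nt.2]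
        else connections) []
  let connections := if connections = [] then connections ++ ["Demo Tour"] else connections
  PySem.List.slice connections none (some 4)

-- ===== PORT B =====
def pvTitleGroups : List (String × List String) :=
  [("Model Context Protocol", ["mcp", "model context protocol"]),
   ("LLM Wiki", ["wiki", "markdown"]),
   ("Active Memory", ["memory", "context"]),
   ("Curiosity Training", ["trace", "question", "suggest"])]

-- module-level table _RESULTS of Source B: row for mask m lists the titles whose bit is set,
-- or the fallback ["Demo Tour"] for the empty mask; enumerate indices are 0..3, so .toNat is exact
def pvResults : List (List String) :=
  (List.range 16).map (fun mask =>
    let titles := ((PySem.List.enumerate pvTitleGroups).filter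
        (fun p => (mask >>> p.1.toNat) % 2 == 1)).map (fun p => p.2.1)
    if titles = [] then ["Demo Tour"] else titles)

def detect_connections_py_alt (content : String) : List String :=
  let haystack := PySem.Str.lower content
  let mask : Nat :=
    ((PySem.List.enumerate pvTitleGroups).filter
      (fun p => p.2.2.any (fun k => PySem.Str.isIn k haystack))).foldl
      (fun m p => m + (1 <<< p.1.toNat)) 0
  pvResults.getD mask []   -- mask < 16, so the in-range Python index _RESULTS[mask] is exact

-- ===== PRECONDITION & SPEC =====
def Spec_detect_connections_py (content : String) (out : List String) : Prop := out = detect_connections_py_alt content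
instance (content : String) (out : List String) : Decidable (Spec_detect_connections_py content out) := by unfold Spec_detect_connections_py; infer_instance

-- ===== CLAIM (what is proved, stated in full; the proofs are below) =====
def Claim_equal_detect_connections_py : Prop := ∀ (content : String), Dom_detect_connections_py content → Spec_detect_connections_py content (detect_connections_py content)

-- ===== LEMMAS AND PROOFS =====

-- A's loop body, named for the lemmas below (definitionally the lambda in port A).
def pvStep (hay : String) (connections : List String) (nt : String × String) : List String :=
  if PySem.Str.isIn nt.1 hay && !(connections.contains nt.2) then connections ++ [nt.2] else connections

-- once a title is in the accumulator, the rest of its keyword group changes nothing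
theorem pvFold_mem (hay t : String) (ks : List String) (conns : List String) (h : t ∈ conns) :
    (ks.map (fun k => (k, t))).foldl (pvStep hay) conns = conns := by
  induction ks with
  | nil => rfl
  | cons k ks ih =>
    simp only [List.map_cons, List.foldl_cons, pvStep]
    rw [if_neg (by simp [h])]
    exact ih

-- A's loop over one keyword group appends its title iff any keyword matches
theorem pvFold_group (hay t : String) (ks : List String) (conns : List String) (h : t ∉ conns) :
    (ks.map (fun k => (k, t))).foldl (pvStep hay) conns =
      if ks.any (fun k => PySem.Str.isIn k hay) then conns ++ [t] else conns := by
  have hc : conns.contains t = false := by simpa using h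
  induction ks with
  | nil => simp
  | cons k ks ih =>
    simp only [List.map_cons, List.foldl_cons, List.any_cons, pvStep]
    rcases Bool.dichotomy (PySem.Str.isIn k hay) with hk | hk
    · simp only [hk, hc, Bool.false_and, Bool.false_or, if_neg (Bool.false_ne_true)]
      exact ih
    · simp only [hk, hc, Bool.not_false, Bool.and_true, Bool.true_or]
      exact pvFold_mem hay t ks _ (by simp)

-- A's whole loop over concatenated groups with pairwise-distinct titles = the grouped filter/map
theorem pvFold_groups (hay : String) (groups : List (String × List String)) (conns : List String)
    (h : ∀ tk ∈ groups, tk.1 ∉ conns)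
    (hd : groups.Pairwise (fun a b => a.1 ≠ b.1)) :
    (groups.flatMap (fun tk => tk.2.map (fun k => (k, tk.1)))).foldl (pvStep hay) conns =
      conns ++ (groups.filter (fun tk => tk.2.any (fun k => PySem.Str.isIn k hay))).map (fun x => x.1) := by
  induction groups generalizing conns with
  | nil => simp
  | cons tk gs ih =>
    simp only [List.flatMap_cons, List.foldl_append, List.filter_cons]
    rw [pvFold_group hay tk.1 tk.2 conns (h tk (by simp))]
    rcases Bool.dichotomy (tk.2.any (fun k => PySem.Str.isIn k hay)) with hm | hm
    · simp only [hm, Bool.false_eq_true, if_neg (fun hF => hF)]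
      rw [ih conns (fun tk' htk' => h tk' (by simp [htk'])) (List.Pairwise.sublist (by simp) hd)]
    · simp only [hm, if_pos trivial]
      rw [ih (conns ++ [tk.1]) ?_ (List.Pairwise.sublist (by simp) hd)]
      · simp
      · intro tk' htk'
        simp only [List.mem_append, List.mem_singleton]
        rintro (hc | hc)
        · exact h tk' (by simp [htk']) hc
        · exact ((List.pairwise_cons.mp hd).1 tk' htk') hc.symm

-- ===== VERDICT (by name: the statement is the Claim_ definition above) =====
theorem detect_connections_py_spec : Claim_equal_detect_connections_py := by
  intro content _
  unfold Spec_detect_connections_py detect_connections_py detect_connections_py_alt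
  simp only []
  rw [show pvArticleConnections
        = pvTitleGroups.flatMap (fun tk => tk.2.map (fun k => (k, tk.1))) from rfl,
      show (fun (connections : List String) (nt : String × String) =>
              if PySem.Str.isIn nt.1 (PySem.Str.lower content) && !(connections.contains nt.2) then
                connections ++ [nt.2]
              else connections)
        = pvStep (PySem.Str.lower content) from rfl,
      pvFold_groups (PySem.Str.lower content) pvTitleGroups [] (by simp) (by decide),
      List.nil_append]
  rcases Bool.dichotomy ((["mcp", "model context protocol"] : List String).any
      (fun k => PySem.Str.isIn k (PySem.Str.lower content))) with h0 | h0 <;>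
  rcases Bool.dichotomy ((["wiki", "markdown"] : List String).any
      (fun k => PySem.Str.isIn k (PySem.Str.lower content))) with h1 | h1 <;>
  rcases Bool.dichotomy ((["memory", "context"] : List String).any
      (fun k => PySem.Str.isIn k (PySem.Str.lower content))) with h2 | h2 <;>
  rcases Bool.dichotomy ((["trace", "question", "suggest"] : List String).any
      (fun k => PySem.Str.isIn k (PySem.Str.lower content))) with h3 | h3 <;>
  simp at h0 h1 h2 h3 <;>
  simp [pvTitleGroups, pvResults, PySem.List.slice, h0, h1, h2, h3]
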